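-- pv_equiv track=rewrite | github.com/Seung0713/Lab11 | exam1practice.py | fourbonacci
-- ===== SOURCE A (Python) =====
-- def fourbonacci(n):
--     tot = 0
--     fir = 1
--     sec = 4
--     thi = 7
--     fou = 8
--     if n== 1:
--         return fir
--     elif n == 2:
--         return sec
--     elif n == 3:
--         return thi
--     elif n == 4:
--         return fou
--
--     for i in range(5, n + 1):
--         tot = (4 * fir) + (3 * sec) + (2 * thi) + (1 * fou)
--         fir = sec
--         sec = thi
--         thi = fou
--         fou = tot
--     return fou
-- ===== SOURCE B (Python) =====
-- # Alternative algorithm: matrix exponentiation of the companion matrix of the recurrence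
-- # f(n) = 4 f(n-4) + 3 f(n-3) + 2 f(n-2) + f(n-1); 4x4 products unrolled.
--
-- def _mul(A, B):
--     (a00, a01, a02, a03), (a10, a11, a12, a13), (a20, a21, a22, a23), (a30, a31, a32, a33) = A
--     (b00, b01, b02, b03), (b10, b11, b12, b13), (b20, b21, b22, b23), (b30, b31, b32, b33) = B
--     return (
--         (a00*b00 + a01*b10 + a02*b20 + a03*b30,
--          a00*b01 + a01*b11 + a02*b21 + a03*b31,
--          a00*b02 + a01*b12 + a02*b22 + a03*b32,
--          a00*b03 + a01*b13 + a02*b23 + a03*b33),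
--         (a10*b00 + a11*b10 + a12*b20 + a13*b30,
--          a10*b01 + a11*b11 + a12*b21 + a13*b31,
--          a10*b02 + a11*b12 + a12*b22 + a13*b32,
--          a10*b03 + a11*b13 + a12*b23 + a13*b33),
--         (a20*b00 + a21*b10 + a22*b20 + a23*b30,
--          a20*b01 + a21*b11 + a22*b21 + a23*b31,
--          a20*b02 + a21*b12 + a22*b22 + a23*b32,
--          a20*b03 + a21*b13 + a22*b23 + a23*b33),
--         (a30*b00 + a31*b10 + a32*b20 + a33*b30,
--          a30*b01 + a31*b11 + a32*b21 + a33*b31,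
--          a30*b02 + a31*b12 + a32*b22 + a33*b32,
--          a30*b03 + a31*b13 + a32*b23 + a33*b33),
--     )
--
-- _I = ((1, 0, 0, 0), (0, 1, 0, 0), (0, 0, 1, 0), (0, 0, 0, 1))
--
-- # companion matrix: sends the state (f(k-3), f(k-2), f(k-1), f(k))
-- # to (f(k-2), f(k-1), f(k), f(k+1))
-- _M = ((0, 1, 0, 0),
--       (0, 0, 1, 0),
--       (0, 0, 0, 1),
--       (4, 3, 2, 1))
--
-- def _pow(m, e):
--     r = _I
--     while e > 0:
--         if e % 2 == 1:
--             r = _mul(r, m)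
--         m = _mul(m, m)
--         e //= 2
--     return r
--
-- def _mat_vec(A, v):
--     (a00, a01, a02, a03), (a10, a11, a12, a13), (a20, a21, a22, a23), (a30, a31, a32, a33) = A
--     (v0, v1, v2, v3) = v
--     return (a00*v0 + a01*v1 + a02*v2 + a03*v3,
--             a10*v0 + a11*v1 + a12*v2 + a13*v3,
--             a20*v0 + a21*v1 + a22*v2 + a23*v3,
--             a30*v0 + a31*v1 + a32*v2 + a33*v3)
--
-- def fourbonacci(n):
--     base = (1, 4, 7, 8)
--     if 1 <= n <= 4:
--         return base[n - 1]
--     e = max(n - 4, 0)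
--     return _mat_vec(_pow(_M, e), base)[3]
-- ===== Notes on version B (the rewrite author's own statement) =====
-- stated objective: alternative
-- what changed: Replaces A's term-by-term recurrence loop with binary exponentiation of the recurrence's companion matrix applied to the base state; measured faster on mid-size inputs but not uniformly confirmed at the largest size (big-int growth dominates), so no speed is claimed.
import Mathlib
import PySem

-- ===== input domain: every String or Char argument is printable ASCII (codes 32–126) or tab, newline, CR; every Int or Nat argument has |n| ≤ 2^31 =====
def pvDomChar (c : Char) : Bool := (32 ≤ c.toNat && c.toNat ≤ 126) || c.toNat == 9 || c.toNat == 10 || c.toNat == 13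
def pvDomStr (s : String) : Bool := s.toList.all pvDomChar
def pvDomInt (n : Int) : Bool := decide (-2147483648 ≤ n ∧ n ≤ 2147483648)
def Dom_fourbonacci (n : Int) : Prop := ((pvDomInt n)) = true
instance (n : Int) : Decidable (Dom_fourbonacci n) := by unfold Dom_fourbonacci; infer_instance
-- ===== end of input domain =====

-- B replaces A's term-by-term recurrence loop by binary exponentiation of the
-- recurrence's 4×4 companion matrix (an alternative algorithm with fewer arithmetic steps).

-- ===== PORT A =====
-- state (fir, sec, thi, fou); `tot` is recomputed from the state at each
-- iteration before use, so it is not part of the carried state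
def fourbonacci (n : Int) : Int :=
  if n = 1 then 1
  else if n = 2 then 4
  else if n = 3 then 7
  else if n = 4 then 8
  else
    ((PySem.List.pyRange 5 (n + 1) 1).foldl
      (fun (st : Int × Int × Int × Int) _ =>
        match st with
        | (fir, sec, thi, fou) =>
          let tot := (4 * fir) + (3 * sec) + (2 * thi) + (1 * fou)
          (sec, thi, fou, tot))
      (1, 4, 7, 8)).2.2.2

-- ===== PORT B =====
-- 4×4 matrices as tuples of row tuples, exactly as in Source B
abbrev V4 : Type := Int × Int × Int × Int
abbrev M4 : Type := V4 × V4 × V4 × V4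

-- Source B _mul (unrolled 4×4 product)
def pvMul (A B : M4) : M4 :=
  match A, B with
  | ((a00, a01, a02, a03), (a10, a11, a12, a13), (a20, a21, a22, a23), (a30, a31, a32, a33)),
    ((b00, b01, b02, b03), (b10, b11, b12, b13), (b20, b21, b22, b23), (b30, b31, b32, b33)) =>
    ((a00*b00 + a01*b10 + a02*b20 + a03*b30,
      a00*b01 + a01*b11 + a02*b21 + a03*b31,
      a00*b02 + a01*b12 + a02*b22 + a03*b32,
      a00*b03 + a01*b13 + a02*b23 + a03*b33),
     (a10*b00 + a11*b10 + a12*b20 + a13*b30,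
      a10*b01 + a11*b11 + a12*b21 + a13*b31,
      a10*b02 + a11*b12 + a12*b22 + a13*b32,
      a10*b03 + a11*b13 + a12*b23 + a13*b33),
     (a20*b00 + a21*b10 + a22*b20 + a23*b30,
      a20*b01 + a21*b11 + a22*b21 + a23*b31,
      a20*b02 + a21*b12 + a22*b22 + a23*b32,
      a20*b03 + a21*b13 + a22*b23 + a23*b33),
     (a30*b00 + a31*b10 + a32*b20 + a33*b30,
      a30*b01 + a31*b11 + a32*b21 + a33*b31,
      a30*b02 + a31*b12 + a32*b22 + a33*b32,
      a30*b03 + a31*b13 + a32*b23 + a33*b33))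

def pvI : M4 := ((1, 0, 0, 0), (0, 1, 0, 0), (0, 0, 1, 0), (0, 0, 0, 1))

def pvM : M4 := ((0, 1, 0, 0), (0, 0, 1, 0), (0, 0, 0, 1), (4, 3, 2, 1))

-- Source B _pow: while-loop over e, accumulator r, as structural recursion on e
def pvPowLoop (r m : M4) (e : Nat) : M4 :=
  if h : e = 0 then r
  else pvPowLoop (if e % 2 = 1 then pvMul r m else r) (pvMul m m) (e / 2)
termination_by e
decreasing_by exact Nat.div_lt_self (Nat.pos_of_ne_zero h) one_lt_two

def pvPow (m : M4) (e : Nat) : M4 := pvPowLoop pvI m e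

-- Source B _mat_vec
def pvMatVec (A : M4) (v : V4) : V4 :=
  match A, v with
  | ((a00, a01, a02, a03), (a10, a11, a12, a13), (a20, a21, a22, a23), (a30, a31, a32, a33)),
    (v0, v1, v2, v3) =>
    (a00*v0 + a01*v1 + a02*v2 + a03*v3,
     a10*v0 + a11*v1 + a12*v2 + a13*v3,
     a20*v0 + a21*v1 + a22*v2 + a23*v3,
     a30*v0 + a31*v1 + a32*v2 + a33*v3)

def fourbonacci_alt (n : Int) : Int :=
  let base : V4 := (1, 4, 7, 8)
  if 1 ≤ n ∧ n ≤ 4 then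
    -- base[n - 1]: tuple indexing, n - 1 ∈ {0,1,2,3} here
    if n - 1 = 0 then base.1
    else if n - 1 = 1 then base.2.1
    else if n - 1 = 2 then base.2.2.1
    else base.2.2.2
  else
    let e : Nat := (max (n - 4) 0).toNat
    (pvMatVec (pvPow pvM e) base).2.2.2

-- ===== PRECONDITION & SPEC =====
def Spec_fourbonacci (n : Int) (out : Int) : Prop := out = fourbonacci_alt n
instance (n : Int) (out : Int) : Decidable (Spec_fourbonacci n out) := by unfold Spec_fourbonacci; infer_instance

-- ===== CLAIM (what is proved, stated in full; the proofs are below) =====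
def Claim_equal_fourbonacci : Prop := ∀ (n : Int), Dom_fourbonacci n → Spec_fourbonacci n (fourbonacci n)

-- ===== LEMMAS AND PROOFS =====

-- one step of the recurrence, the action of the companion matrix on the state
def pvStep (v : V4) : V4 :=
  (v.2.1, v.2.2.1, v.2.2.2, 4 * v.1 + 3 * v.2.1 + 2 * v.2.2.1 + 1 * v.2.2.2)

-- iterated matrix power, the reference semantics of pvPow
def pvNpow (m : M4) : Nat → M4
  | 0 => pvI
  | e + 1 => pvMul (pvNpow m e) m

theorem pvMul_assoc (a b c : M4) : pvMul (pvMul a b) c = pvMul a (pvMul b c) := by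
  obtain ⟨⟨_,_,_,_⟩,⟨_,_,_,_⟩,⟨_,_,_,_⟩,⟨_,_,_,_⟩⟩ := a
  obtain ⟨⟨_,_,_,_⟩,⟨_,_,_,_⟩,⟨_,_,_,_⟩,⟨_,_,_,_⟩⟩ := b
  obtain ⟨⟨_,_,_,_⟩,⟨_,_,_,_⟩,⟨_,_,_,_⟩,⟨_,_,_,_⟩⟩ := c
  simp only [pvMul, Prod.mk.injEq]
  refine ⟨⟨by ring, by ring, by ring, by ring⟩, ⟨by ring, by ring, by ring, by ring⟩,
          ⟨by ring, by ring, by ring, by ring⟩, by ring, by ring, by ring, by ring⟩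

theorem pvMul_I (m : M4) : pvMul m pvI = m := by
  obtain ⟨⟨_,_,_,_⟩,⟨_,_,_,_⟩,⟨_,_,_,_⟩,⟨_,_,_,_⟩⟩ := m
  simp only [pvMul, pvI, Prod.mk.injEq]
  refine ⟨⟨by ring, by ring, by ring, by ring⟩, ⟨by ring, by ring, by ring, by ring⟩,
          ⟨by ring, by ring, by ring, by ring⟩, by ring, by ring, by ring, by ring⟩

theorem pvI_mul (m : M4) : pvMul pvI m = m := by
  obtain ⟨⟨_,_,_,_⟩,⟨_,_,_,_⟩,⟨_,_,_,_⟩,⟨_,_,_,_⟩⟩ := m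
  simp only [pvMul, pvI, Prod.mk.injEq]
  refine ⟨⟨by ring, by ring, by ring, by ring⟩, ⟨by ring, by ring, by ring, by ring⟩,
          ⟨by ring, by ring, by ring, by ring⟩, by ring, by ring, by ring, by ring⟩

theorem pvNpow_succ_left (m : M4) (e : Nat) :
    pvNpow m (e + 1) = pvMul m (pvNpow m e) := by
  induction e with
  | zero => simp [pvNpow, pvMul_I, pvI_mul]
  | succ e ih =>
    calc pvNpow m (e + 1 + 1) = pvMul (pvMul m (pvNpow m e)) m := by rw [pvNpow, ih]
      _ = pvMul m (pvMul (pvNpow m e) m) := pvMul_assoc ..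
      _ = pvMul m (pvNpow m (e + 1)) := rfl

theorem pvNpow_two_mul (m : M4) (k : Nat) :
    pvNpow (pvMul m m) k = pvNpow m (2 * k) := by
  induction k with
  | zero => rfl
  | succ k ih =>
    have : 2 * (k + 1) = 2 * k + 1 + 1 := by ring
    rw [pvNpow, ih, this, pvNpow, pvNpow, pvMul_assoc]

theorem pvPowLoop_eq (e : Nat) : ∀ r m : M4, pvPowLoop r m e = pvMul r (pvNpow m e) := by
  induction e using Nat.strong_induction_on with
  | _ e ih =>
    intro r m
    rw [pvPowLoop]
    by_cases h : e = 0
    · simp [h, pvNpow, pvMul_I]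
    · simp only [h, dite_false]
      rw [ih (e / 2) (Nat.div_lt_self (Nat.pos_of_ne_zero h) one_lt_two),
          pvNpow_two_mul]
      rcases Nat.even_or_odd e with he | he
      · have h2 : e % 2 = 0 := Nat.even_iff.mp he
        have h3 : 2 * (e / 2) = e := by omega
        simp [h2, h3]
      · have h2 : e % 2 = 1 := Nat.odd_iff.mp he
        have h3 : e = 2 * (e / 2) + 1 := by omega
        simp only [h2, reduceIte]
        rw [pvMul_assoc]
        conv_rhs => rw [h3]
        rw [pvNpow_succ_left]

theorem pvMatVec_mul (a b : M4) (v : V4) :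
    pvMatVec (pvMul a b) v = pvMatVec a (pvMatVec b v) := by
  obtain ⟨⟨_,_,_,_⟩,⟨_,_,_,_⟩,⟨_,_,_,_⟩,⟨_,_,_,_⟩⟩ := a
  obtain ⟨⟨_,_,_,_⟩,⟨_,_,_,_⟩,⟨_,_,_,_⟩,⟨_,_,_,_⟩⟩ := b
  obtain ⟨_,_,_,_⟩ := v
  simp only [pvMul, pvMatVec, Prod.mk.injEq]
  refine ⟨by ring, by ring, by ring, by ring⟩

theorem pvMatVec_I (v : V4) : pvMatVec pvI v = v := by
  obtain ⟨_,_,_,_⟩ := v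
  simp only [pvI, pvMatVec, Prod.mk.injEq]
  refine ⟨by ring, by ring, by ring, by ring⟩

theorem pvMatVec_M (v : V4) : pvMatVec pvM v = pvStep v := by
  obtain ⟨_,_,_,_⟩ := v
  simp only [pvM, pvMatVec, pvStep, Prod.mk.injEq]
  repeat' constructor
  all_goals first | trivial | ring

theorem pvMatVec_npow (e : Nat) (v : V4) :
    pvMatVec (pvNpow pvM e) v = pvStep^[e] v := by
  induction e generalizing v with
  | zero => simp [pvNpow, pvMatVec_I]
  | succ e ih =>
    rw [pvNpow, pvMatVec_mul, pvMatVec_M, ih, Function.iterate_succ_apply]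

-- A's loop body is pvStep on the state tuple
theorem foldl_step (l : List Int) (v : V4) :
    l.foldl
      (fun (st : Int × Int × Int × Int) _ =>
        match st with
        | (fir, sec, thi, fou) =>
          let tot := (4 * fir) + (3 * sec) + (2 * thi) + (1 * fou)
          (sec, thi, fou, tot)) v
    = pvStep^[l.length] v := by
  induction l generalizing v with
  | nil => rfl
  | cons a l ih =>
    obtain ⟨f, s, t, u⟩ := v
    simp only [List.foldl_cons, List.length_cons, ih]
    rw [Function.iterate_succ_apply]
    rfl

-- ===== VERDICT (by name: the statement is the Claim_ definition above) =====
theorem fourbonacci_spec : Claim_equal_fourbonacci := by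
  intro n _
  unfold Spec_fourbonacci
  by_cases h1 : n = 1
  · subst h1; decide
  by_cases h2 : n = 2
  · subst h2; decide
  by_cases h3 : n = 3
  · subst h3; decide
  by_cases h4 : n = 4
  · subst h4; decide
  have hb : ¬ (1 ≤ n ∧ n ≤ 4) := by omega
  rw [fourbonacci, fourbonacci_alt]
  simp only [if_neg h1, if_neg h2, if_neg h3, if_neg h4, if_neg hb]
  rw [foldl_step, PySem.List.length_pyRange_one, pvPow, pvPowLoop_eq, pvI_mul,
      pvMatVec_npow]
  have h : (n + 1 - 5).toNat = (max (n - 4) 0).toNat := by omega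
  rw [h]
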